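-- pv_equiv track=rewrite | github.com/alekseimi/TRIRProject | rest_client.py | parse_contributors
-- ===== SOURCE A (Python) =====
-- def parse_contributors(data):
--     contributor_number_list = [0] * 52
--     for i in range(0, len(data)):
--         json_weeks = data[i]
--         iter_ = 0
--         for week in json_weeks['weeks'][-52:]:
--             if week['c'] != 0:
--                 contributor_number_list[iter_] = contributor_number_list[iter_] + 1
--             iter_ = iter_ + 1
--     return contributor_number_list
-- ===== SOURCE B (Python) =====
-- def parse_contributors(data):
--     # Different algorithm: flatten every nonzero week into a flat list of
--     # week-position "events", sort it, then emit the 52 counts as run lengths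
--     # with a single two-pointer scan over the sorted events.
--     events = []
--     for d in data:
--         row = d['weeks'][-52:]
--         events.extend(p for p in range(len(row)) if row[p]['c'] != 0)
--     events.sort()
--     out, i = [], 0
--     for p in range(52):
--         j = i
--         while j < len(events) and events[j] == p:
--             j += 1
--         out.append(j - i)
--         i = j
--     return out
-- ===== Notes on version B (the rewrite author's own statement) =====
-- stated objective: alternative
-- what changed: B flattens every nonzero week into a flat list of week-position events, sorts it, and reads off the 52 counts as run lengths with one two-pointer scan, instead of A's in-place mutation of a 52-slot counter array while iterating contributors.
import Mathlib
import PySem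

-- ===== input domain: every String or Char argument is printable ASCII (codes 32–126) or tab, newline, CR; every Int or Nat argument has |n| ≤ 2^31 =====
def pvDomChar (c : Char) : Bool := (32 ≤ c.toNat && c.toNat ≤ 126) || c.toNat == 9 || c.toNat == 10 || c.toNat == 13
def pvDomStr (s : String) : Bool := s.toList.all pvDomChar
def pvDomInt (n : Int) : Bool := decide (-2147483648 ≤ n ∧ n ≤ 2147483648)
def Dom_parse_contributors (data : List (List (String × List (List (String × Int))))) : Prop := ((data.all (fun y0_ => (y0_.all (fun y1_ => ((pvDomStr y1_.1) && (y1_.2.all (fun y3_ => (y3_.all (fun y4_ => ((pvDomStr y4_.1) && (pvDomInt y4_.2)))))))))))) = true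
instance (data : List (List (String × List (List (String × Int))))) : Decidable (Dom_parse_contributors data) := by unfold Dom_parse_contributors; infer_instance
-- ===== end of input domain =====

-- B flattens nonzero weeks into a flat event list, sorts it and reads off run lengths, instead of A's mutated 52-slot counter array (alternative algorithm, similar cost).


-- shared helper: association-list lookup, first match (Python dict access)
def pvLookup {α : Type} (d : List (String × α)) (k : String) : Option α :=
  (d.find? (fun p => p.1 == k)).map (·.2)

-- ===== PORT A =====
-- inner loop: 'for week in json_weeks["weeks"][-52:]' with the explicit iter_ counter
def pvA_inner : List (List (String × Int)) → List Int → Nat → List Int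
  | [], acc, _ => acc
  | w :: ws, acc, it =>
      pvA_inner ws
        (if (pvLookup w "c").getD 0 ≠ 0 then acc.set it (acc.getD it 0 + 1) else acc)
        (it + 1)

def parse_contributors (data : List (List (String × List (List (String × Int))))) : List Int :=
  (PySem.List.pyRange 0 data.length 1).foldl
    (fun acc i =>
      let json_weeks := PySem.List.pyGetD data i []
      pvA_inner (PySem.List.slice ((pvLookup json_weeks "weeks").getD []) (some (-52)) none) acc 0)
    (List.replicate 52 0)

-- ===== PORT B =====
-- the two-pointer run-length scan over the sorted events ('for p in range(52): while events[j]==p: …')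
def pvRuns (p : Int) (fuel : Nat) (evs : List Int) : List Int :=
  match fuel with
  | 0 => []
  | f + 1 =>
      ((evs.takeWhile (fun x => x == p)).length : Int)
        :: pvRuns (p + 1) f (evs.dropWhile (fun x => x == p))

def parse_contributors_alt (data : List (List (String × List (List (String × Int))))) : List Int :=
  let events := data.foldl
    (fun acc d =>
      let row := PySem.List.slice ((pvLookup d "weeks").getD []) (some (-52)) none
      acc ++ (PySem.List.pyRange 0 row.length 1).filter
        (fun p => (pvLookup (PySem.List.pyGetD row p []) "c").getD 0 != 0))
    []
  pvRuns 0 52 (PySem.List.sorted events (fun x => x) false)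

-- ===== PRECONDITION & SPEC =====
-- Pre_ excludes exactly the inputs where the Python raises KeyError: a contributor
-- without a "weeks" key, or a week among its last 52 without a "c" key.
def Pre_parse_contributors (data : List (List (String × List (List (String × Int))))) : Prop :=
  ∀ d ∈ data, (pvLookup d "weeks").isSome = true ∧
    ∀ w ∈ PySem.List.slice ((pvLookup d "weeks").getD []) (some (-52)) none,
      (pvLookup w "c").isSome = true
instance (data : List (List (String × List (List (String × Int))))) : Decidable (Pre_parse_contributors data) := by unfold Pre_parse_contributors; infer_instance

def pvWitness_parse_contributors : (List (List (String × List (List (String × Int))))) :=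
  [[("weeks", [[("c", 1)], [("c", 0)]])]]

def Spec_parse_contributors (data : List (List (String × List (List (String × Int))))) (out : List Int) : Prop := out = parse_contributors_alt data
instance (data : List (List (String × List (List (String × Int))))) (out : List Int) : Decidable (Spec_parse_contributors data out) := by unfold Spec_parse_contributors; infer_instance

-- ===== CLAIM (what is proved, stated in full; the proofs are below) =====
def Claim_equal_parse_contributors : Prop := ∀ (data : List (List (String × List (List (String × Int))))), Dom_parse_contributors data → Pre_parse_contributors data → Spec_parse_contributors data (parse_contributors data)

-- ===== LEMMAS AND PROOFS =====

-- the sliced row of one contributor (proof-side abbreviation of the expression both ports use)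
def pvRowOf (d : List (String × List (List (String × Int)))) : List (List (String × Int)) :=
  PySem.List.slice ((pvLookup d "weeks").getD []) (some (-52)) none

-- per-row contribution of a (already sliced) row at week position pos
def pvHit (row : List (List (String × Int))) (pos : Nat) : Int :=
  if pos < row.length ∧ (pvLookup (row.getD pos []) "c").getD 0 ≠ 0 then 1 else 0

-- the per-row event list B builds
def pvRowEv (row : List (List (String × Int))) : List Int :=
  (PySem.List.pyRange 0 row.length 1).filter
    (fun p => (pvLookup (PySem.List.pyGetD row p []) "c").getD 0 != 0)

lemma pvRowOf_len (d : List (String × List (List (String × Int)))) : (pvRowOf d).length ≤ 52 := by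
  unfold pvRowOf
  rw [PySem.List.slice_from_neg_ofNat _ 52 (by omega)]
  simp
  omega

lemma pvGetD_set (xs : List Int) (i j : Nat) (v : Int) :
    (xs.set i v).getD j 0 = if i = j ∧ i < xs.length then v else xs.getD j 0 := by
  by_cases hij : i = j
  · subst hij
    by_cases h : i < xs.length <;> simp [List.getD, h]
  · simp [List.getD, hij]

lemma pvA_inner_length (ws : List (List (String × Int))) (acc : List Int) (it : Nat) :
    (pvA_inner ws acc it).length = acc.length := by
  induction ws generalizing acc it with
  | nil => rfl
  | cons w ws ih =>
    simp only [pvA_inner, ih]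
    split_ifs <;> simp

lemma pvA_inner_getD (ws : List (List (String × Int))) (acc : List Int) (it pos : Nat)
    (hlen : it + ws.length ≤ acc.length) :
    (pvA_inner ws acc it).getD pos 0 =
      acc.getD pos 0 +
        (if it ≤ pos ∧ pos < it + ws.length ∧
            (pvLookup (ws.getD (pos - it) []) "c").getD 0 ≠ 0 then 1 else 0) := by
  induction ws generalizing acc it with
  | nil =>
    simp only [pvA_inner, List.length_nil, Nat.add_zero]
    have hfalse : ¬ (it ≤ pos ∧ pos < it ∧ (pvLookup (([] : List (List (String × Int))).getD (pos - it) []) "c").getD 0 ≠ 0) := by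
      rintro ⟨h1, h2, -⟩; omega
    rw [if_neg hfalse, add_zero]
  | cons w ws ih =>
    simp only [pvA_inner]
    set acc' := (if (pvLookup w "c").getD 0 ≠ 0 then acc.set it (acc.getD it 0 + 1) else acc) with hacc'
    have hlen' : acc'.length = acc.length := by
      rw [hacc']; split_ifs <;> simp
    rw [ih acc' (it + 1) (by simp only [List.length_cons] at hlen; omega)]
    rcases Nat.lt_trichotomy pos it with hlt | heq | hgt
    · -- pos < it: nothing written at pos, both side conditions false
      have hA : acc'.getD pos 0 = acc.getD pos 0 := by
        rw [hacc']; split_ifs with h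
        · rw [pvGetD_set]
          have : ¬ (it = pos ∧ it < acc.length) := by rintro ⟨h1, -⟩; omega
          rw [if_neg this]
        · rfl
      have h1 : ¬ (it + 1 ≤ pos ∧ pos < it + 1 + ws.length ∧ (pvLookup (ws.getD (pos - (it+1)) []) "c").getD 0 ≠ 0) := by
        rintro ⟨h1, -, -⟩; omega
      have h2 : ¬ (it ≤ pos ∧ pos < it + (w :: ws).length ∧ (pvLookup ((w :: ws).getD (pos - it) []) "c").getD 0 ≠ 0) := by
        rintro ⟨h1, -, -⟩; omega
      rw [if_neg h1, if_neg h2, hA]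
    · -- pos = it: this step writes exactly position it
      subst heq
      have hwr : pos < acc.length := by simp only [List.length_cons] at hlen; omega
      have hA : acc'.getD pos 0 = acc.getD pos 0 + (if (pvLookup w "c").getD 0 ≠ 0 then 1 else 0) := by
        rw [hacc']; split_ifs with h
        · rw [pvGetD_set]; simp [hwr]
        · simp
      have h1 : ¬ (pos + 1 ≤ pos ∧ pos < pos + 1 + ws.length ∧ (pvLookup (ws.getD (pos - (pos+1)) []) "c").getD 0 ≠ 0) := by
        rintro ⟨h1, -, -⟩; omega
      have h2 : (pos ≤ pos ∧ pos < pos + (w :: ws).length ∧ (pvLookup ((w :: ws).getD (pos - pos) []) "c").getD 0 ≠ 0) ↔ ((pvLookup w "c").getD 0 ≠ 0) := by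
        simp only [Nat.sub_self, List.getD_cons_zero, List.length_cons, le_refl, true_and]
        constructor
        · rintro ⟨-, h⟩; exact h
        · intro h; exact ⟨by omega, h⟩
      rw [if_neg h1, add_zero, hA, if_congr h2 rfl rfl]
    · -- it < pos: the write (if any) misses pos; shift the index
      have hA : acc'.getD pos 0 = acc.getD pos 0 := by
        rw [hacc']; split_ifs with h
        · rw [pvGetD_set]
          have : ¬ (it = pos ∧ it < acc.length) := by rintro ⟨h1, -⟩; omega
          rw [if_neg this]
        · rfl
      have hshift : pos - it = (pos - (it + 1)) + 1 := by omega
      have hgd : (w :: ws).getD (pos - it) [] = ws.getD (pos - (it + 1)) [] := by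
        rw [hshift]; rfl
      have hcond : (it + 1 ≤ pos ∧ pos < it + 1 + ws.length ∧ (pvLookup (ws.getD (pos - (it+1)) []) "c").getD 0 ≠ 0)
          ↔ (it ≤ pos ∧ pos < it + (w :: ws).length ∧ (pvLookup ((w :: ws).getD (pos - it) []) "c").getD 0 ≠ 0) := by
        rw [hgd]
        constructor
        · rintro ⟨-, h2, h3⟩; exact ⟨by omega, by simp only [List.length_cons]; omega, h3⟩
        · rintro ⟨-, h2, h3⟩; exact ⟨by omega, by simp only [List.length_cons] at h2; omega, h3⟩
      rw [hA, if_congr hcond rfl rfl]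

-- A's outer loop, pointwise: position pos of the counter array accumulates one pvHit per contributor
lemma pvA_fold_getD (ds : List (List (String × List (List (String × Int))))) (acc : List Int)
    (hlen : acc.length = 52) (pos : Nat) :
    (ds.foldl (fun a d => pvA_inner (pvRowOf d) a 0) acc).getD pos 0 =
      acc.getD pos 0 + ds.foldl (fun s d => s + pvHit (pvRowOf d) pos) 0 := by
  induction ds generalizing acc with
  | nil => simp
  | cons d ds ih =>
    simp only [List.foldl_cons]
    rw [ih _ (by rw [pvA_inner_length, hlen])]
    rw [pvA_inner_getD _ _ _ _ (by rw [hlen]; simpa using pvRowOf_len d)]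
    have hhit : (if 0 ≤ pos ∧ pos < 0 + (pvRowOf d).length ∧ (pvLookup ((pvRowOf d).getD (pos - 0) []) "c").getD 0 ≠ 0 then (1:Int) else 0)
        = pvHit (pvRowOf d) pos := by
      unfold pvHit
      simp
    rw [hhit,
        PySem.List.foldl_add ds (fun d => pvHit (pvRowOf d) pos) 0,
        PySem.List.foldl_add ds (fun d => pvHit (pvRowOf d) pos) (0 + pvHit (pvRowOf d) pos)]
    ring

lemma pvA_fold_length (ds : List (List (String × List (List (String × Int))))) (acc : List Int) :
    (ds.foldl (fun a d => pvA_inner (pvRowOf d) a 0) acc).length = acc.length := by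
  induction ds generalizing acc with
  | nil => rfl
  | cons d ds ih => simp only [List.foldl_cons]; rw [ih, pvA_inner_length]

-- counting one position in a per-row event list gives that row's 0/1 hit
lemma pvRowEv_count_aux (row : List (List (String × Int))) (n k : Nat) (hn : n ≤ row.length) :
    ((((PySem.List.pyRange 0 n 1).filter
        (fun p => (pvLookup (PySem.List.pyGetD row p []) "c").getD 0 != 0)).count (k : Int) : Int))
      = if k < n ∧ (pvLookup (row.getD k []) "c").getD 0 ≠ 0 then 1 else 0 := by
  induction n with
  | zero =>
    rw [PySem.List.pyRange_one_eq_nil (by omega)]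
    simp
  | succ m ih =>
    have hsplit : PySem.List.pyRange 0 ((m + 1 : Nat) : Int) 1
        = PySem.List.pyRange 0 (m : Nat) 1 ++ [(m : Int)] := by
      have : ((m + 1 : Nat) : Int) = (m : Int) + 1 := by push_cast; ring
      rw [this, PySem.List.pyRange_one_succ_right (by omega)]
    rw [hsplit, List.filter_append, List.count_append, Nat.cast_add, ih (by omega),
        List.filter_singleton, PySem.List.pyGetD_natCast]
    by_cases hc : ((pvLookup (row.getD m []) "c").getD 0 != 0) = true
    · rw [hc, cond_true]
      have hcnt : ((List.count ((k : Nat) : Int) [((m : Nat) : Int)] : Nat) : Int)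
          = if k = m then 1 else 0 := by
        by_cases hk : k = m
        · subst hk; simp
        · have hki : ¬(((m : Nat) : Int) = ((k : Nat) : Int)) := by
            intro h
            exact hk (by exact_mod_cast h.symm)
          simp [hki, hk]
      rw [hcnt]
      have hcm : (pvLookup (row.getD m []) "c").getD 0 ≠ 0 := by simpa using hc
      by_cases hk : k = m
      · subst hk
        rw [if_neg (fun h => absurd h.1 (lt_irrefl _)), if_pos rfl,
            if_pos ⟨by omega, hcm⟩]
        norm_num
      · rw [if_neg hk]
        by_cases h2 : k < m ∧ (pvLookup (row.getD k []) "c").getD 0 ≠ 0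
        · rw [if_pos h2, if_pos ⟨by omega, h2.2⟩]
          norm_num
        · rw [if_neg h2, if_neg (fun h => h2 ⟨by omega, h.2⟩)]
          norm_num
    · rw [Bool.not_eq_true] at hc
      rw [hc, cond_false]
      have hcm0 : (pvLookup (row.getD m []) "c").getD 0 = 0 := by simpa using hc
      simp only [List.count_nil, Nat.cast_zero, add_zero]
      by_cases h2 : k < m ∧ (pvLookup (row.getD k []) "c").getD 0 ≠ 0
      · rw [if_pos h2, if_pos ⟨by omega, h2.2⟩]
      · rw [if_neg h2, if_neg ?_]
        rintro ⟨ha, hb⟩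
        rcases Nat.lt_or_ge k m with h | h
        · exact h2 ⟨h, hb⟩
        · have hkm : k = m := by omega
          subst hkm
          exact hb hcm0

lemma pvRowEv_count (row : List (List (String × Int))) (k : Nat) :
    (((pvRowEv row).count (k : Int) : Int)) = pvHit row k := by
  unfold pvRowEv pvHit
  exact pvRowEv_count_aux row row.length k (le_refl _)

-- count distributes over the flattened event list
lemma pvCount_flatMap {α : Type} (g : α → List Int) (l : List α) (v : Int) :
    (l.flatMap g).count v = (l.map (fun d => (g d).count v)).sum := by
  induction l with
  | nil => simp
  | cons d l ih => simp [List.flatMap_cons, List.count_append, ih]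

-- run-length scan on a sorted lower-bounded list: takeWhile (== p) has length count p
lemma pvTakeWhile_count (evs : List Int) (p : Int)
    (hs : evs.Pairwise (· ≤ ·)) (hlb : ∀ x ∈ evs, p ≤ x) :
    (evs.takeWhile (fun x => x == p)).length = evs.count p := by
  induction evs with
  | nil => rfl
  | cons h t ih =>
    by_cases hp : h = p
    · subst hp
      rw [List.takeWhile_cons_of_pos (by simp)]
      simp only [List.length_cons, List.count_cons_self]
      rw [ih hs.of_cons (fun x hx => hlb x (List.mem_cons_of_mem _ hx))]
    · rw [List.takeWhile_cons_of_neg (by simpa using hp)]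
      have hgt : p < h := lt_of_le_of_ne (hlb h (List.mem_cons_self)) (fun e => hp e.symm)
      have hz : t.count p = 0 := by
        rw [List.count_eq_zero]
        intro hmem
        have := (List.pairwise_cons.mp hs).1 p hmem
        omega
      simp [hp, hz]

lemma pvDropWhile_lb (evs : List Int) (p : Int)
    (hs : evs.Pairwise (· ≤ ·)) (hlb : ∀ x ∈ evs, p ≤ x) :
    ∀ x ∈ evs.dropWhile (fun x => x == p), p + 1 ≤ x := by
  induction evs with
  | nil => intro x hx; simp at hx
  | cons h t ih =>
    by_cases hp : h = p
    · subst hp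
      rw [List.dropWhile_cons_of_pos (by simp)]
      exact ih hs.of_cons (fun x hx => hlb x (List.mem_cons_of_mem _ hx))
    · rw [List.dropWhile_cons_of_neg (by simpa using hp)]
      intro x hx
      have hgt : p < h := lt_of_le_of_ne (hlb h (List.mem_cons_self)) (fun e => hp e.symm)
      rcases List.mem_cons.mp hx with rfl | hx'
      · omega
      · have := (List.pairwise_cons.mp hs).1 x hx'
        omega

lemma pvCount_dropWhile (evs : List Int) (p q : Int) (hq : q ≠ p) :
    (evs.dropWhile (fun x => x == p)).count q = evs.count q := by
  conv_rhs => rw [← List.takeWhile_append_dropWhile (p := fun x => x == p) (l := evs)]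
  rw [List.count_append]
  have hz : (evs.takeWhile (fun x => x == p)).count q = 0 := by
    rw [List.count_eq_zero]
    intro hmem
    have := List.mem_takeWhile_imp hmem
    simp only [beq_iff_eq] at this
    exact hq this
  omega

lemma pvRuns_length (p : Int) (fuel : Nat) (evs : List Int) :
    (pvRuns p fuel evs).length = fuel := by
  induction fuel generalizing p evs with
  | zero => rfl
  | succ f ih => simp [pvRuns, ih]

lemma pvRuns_getD (fuel : Nat) (p : Int) (evs : List Int) (k : Nat)
    (hs : evs.Pairwise (· ≤ ·)) (hlb : ∀ x ∈ evs, p ≤ x) (hk : k < fuel) :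
    (pvRuns p fuel evs).getD k 0 = ((evs.count (p + k) : Int)) := by
  induction fuel generalizing p evs k with
  | zero => omega
  | succ f ih =>
    simp only [pvRuns]
    match k with
    | 0 =>
      simp only [List.getD_cons_zero, Nat.cast_zero, add_zero]
      rw [pvTakeWhile_count evs p hs hlb]
    | k' + 1 =>
      simp only [List.getD_cons_succ]
      have hs' : (evs.dropWhile (fun x => x == p)).Pairwise (· ≤ ·) :=
        hs.sublist (List.dropWhile_sublist _)
      rw [ih (p + 1) _ k' hs' (pvDropWhile_lb evs p hs hlb) (by omega)]
      rw [pvCount_dropWhile evs p (p + 1 + k') (by omega)]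
      have harg : p + 1 + (k' : Int) = p + ((k' + 1 : Nat) : Int) := by push_cast; ring
      rw [harg]

-- ===== VERDICT (by name: the statement is the Claim_ definition above) =====
theorem parse_contributors_spec : Claim_equal_parse_contributors := by
  intro data _ _
  unfold Spec_parse_contributors parse_contributors parse_contributors_alt
  rw [PySem.List.foldl_pyRange_zero_pyGetD' data [] (fun acc json_weeks =>
        pvA_inner (PySem.List.slice ((pvLookup json_weeks "weeks").getD []) (some (-52)) none) acc 0)]
  rw [PySem.List.foldl_append_eq_flatMap]
  show (data.foldl (fun a d => pvA_inner (pvRowOf d) a 0) (List.replicate 52 0))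
      = pvRuns 0 52 (PySem.List.sorted ([] ++ data.flatMap (fun d => pvRowEv (pvRowOf d))) (fun x => x) false)
  simp only [List.nil_append]
  set events := data.flatMap (fun d => pvRowEv (pvRowOf d)) with hev
  set sev := PySem.List.sorted events (fun x => x) false with hsev
  have hperm : sev.Perm events := PySem.List.sorted_perm events (fun x => x) false
  have hpw : sev.Pairwise (· ≤ ·) := PySem.List.sorted_pairwise events (fun x => x)
  have hlb : ∀ x ∈ sev, (0 : Int) ≤ x := by
    intro x hx
    have hx' : x ∈ events := hperm.mem_iff.mp hx
    rw [hev] at hx'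
    rcases List.mem_flatMap.mp hx' with ⟨d, -, hxd⟩
    unfold pvRowEv at hxd
    have := List.mem_of_mem_filter hxd
    rw [PySem.List.mem_pyRange_one] at this
    exact this.1
  have hAlen : (data.foldl (fun a d => pvA_inner (pvRowOf d) a 0) (List.replicate 52 0)).length = 52 := by
    rw [pvA_fold_length]; simp
  apply List.ext_getElem
  · rw [hAlen, pvRuns_length]
  · intro k hk1 hk2
    rw [hAlen] at hk1
    rw [← List.getD_eq_getElem _ 0 hk2, ← List.getD_eq_getElem _ 0 (by rw [hAlen]; exact hk1)]
    rw [pvRuns_getD 52 0 sev k hpw hlb hk1]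
    rw [pvA_fold_getD _ _ (by simp) k]
    have hz : (List.replicate 52 (0:Int)).getD k 0 = 0 := by
      rw [List.getD_eq_getElem _ _ (by simpa using hk1), List.getElem_replicate]
    rw [hz, zero_add]
    rw [hperm.count_eq, hev]
    rw [pvCount_flatMap (fun d => pvRowEv (pvRowOf d)) data]
    rw [PySem.List.foldl_add data (fun d => pvHit (pvRowOf d) k) 0, zero_add]
    have : (0 : Int) + (k : Nat) = ((k : Nat) : Int) := by ring
    rw [this]
    rw [Nat.cast_list_sum]
    rw [List.map_map]
    congr 1
    refine List.map_congr_left fun d _ => ?_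
    simp only [Function.comp]
    exact (pvRowEv_count (pvRowOf d) k).symm
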